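-- pv_equiv track=rewrite | github.com/Alyxion/ImageStag | imagestag/components/stream_view/webrtc.py | _modify_sdp_bitrate
-- ===== SOURCE A (Python) =====
-- def _modify_sdp_bitrate(sdp: str, bitrate_bps: int) -> str:
--     """Modify SDP to set video bitrate constraint.
--
--     Adds b=AS (Application Specific) bandwidth line to video m-line.
--     Also adds x-google-max-bitrate for Chrome compatibility.
--
--     :param sdp: Original SDP string
--     :param bitrate_bps: Target bitrate in bits per second
--     :return: Modified SDP string
--     """
--     bitrate_kbps = bitrate_bps // 1000
--     lines = sdp.split("\r\n")
--     result = []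
--     in_video_section = False
--
--     for i, line in enumerate(lines):
--         result.append(line)
--
--         # Detect video m-line
--         if line.startswith("m=video"):
--             in_video_section = True
--         elif line.startswith("m="):
--             in_video_section = False
--
--         # Add bandwidth after c= line in video section
--         if in_video_section and line.startswith("c="):
--             # Add AS (Application Specific) bandwidth in kbps
--             result.append(f"b=AS:{bitrate_kbps}")
--             # Add TIAS (Transport Independent Application Specific) in bps
--             result.append(f"b=TIAS:{bitrate_bps}")
--
--         # Modify fmtp lines to add bitrate constraints for codecs
--         if in_video_section and line.startswith("a=fmtp:"):
--             # Add x-google-max-bitrate for Chrome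
--             if "x-google-max-bitrate" not in line:
--                 # Append to existing fmtp line
--                 result[-1] = f"{line};x-google-max-bitrate={bitrate_kbps};x-google-min-bitrate={bitrate_kbps // 2};x-google-start-bitrate={bitrate_kbps}"
--
--     return "\r\n".join(result)
-- ===== SOURCE B (Python) =====
-- def _video_line(line, kbps, bps):
--     """Lines to emit for one line of a video media block."""
--     if line.startswith("c="):
--         return [line, f"b=AS:{kbps}", f"b=TIAS:{bps}"]
--     if line.startswith("a=fmtp:") and "x-google-max-bitrate" not in line:
--         return [f"{line};x-google-max-bitrate={kbps};x-google-min-bitrate={kbps // 2};x-google-start-bitrate={kbps}"]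
--     return [line]
--
--
-- def _modify_sdp_bitrate(sdp: str, bitrate_bps: int) -> str:
--     """Partition the SDP into a prologue plus media blocks (one per 'm=' line),
--     rewrite only the video blocks, and rejoin."""
--     kbps = bitrate_bps // 1000
--     lines = sdp.split("\r\n")
--     # prologue: lines before the first m= line
--     cut = 0
--     while cut < len(lines) and not lines[cut].startswith("m="):
--         cut += 1
--     prologue, rest = lines[:cut], lines[cut:]
--     # blocks: each starts at an m= line, runs until the next one
--     blocks = []
--     while rest:
--         j = 1
--         while j < len(rest) and not rest[j].startswith("m="):
--             j += 1
--         blocks.append(rest[:j])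
--         rest = rest[j:]
--     out = list(prologue)
--     for block in blocks:
--         if block[0].startswith("m=video"):
--             for line in block:
--                 out.extend(_video_line(line, kbps, bitrate_bps))
--         else:
--             out.extend(block)
--     return "\r\n".join(out)
-- ===== Notes on version B (the rewrite author's own statement) =====
-- stated objective: alternative
-- what changed: Instead of a single flat loop threading an in_video boolean and patching result[-1] in place, B partitions the SDP lines into a prologue plus media blocks (a new block at every m= line), copies non-video blocks verbatim, and expands each line of a video block into its emitted lines via a pure helper before rejoining.
import Mathlib
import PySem

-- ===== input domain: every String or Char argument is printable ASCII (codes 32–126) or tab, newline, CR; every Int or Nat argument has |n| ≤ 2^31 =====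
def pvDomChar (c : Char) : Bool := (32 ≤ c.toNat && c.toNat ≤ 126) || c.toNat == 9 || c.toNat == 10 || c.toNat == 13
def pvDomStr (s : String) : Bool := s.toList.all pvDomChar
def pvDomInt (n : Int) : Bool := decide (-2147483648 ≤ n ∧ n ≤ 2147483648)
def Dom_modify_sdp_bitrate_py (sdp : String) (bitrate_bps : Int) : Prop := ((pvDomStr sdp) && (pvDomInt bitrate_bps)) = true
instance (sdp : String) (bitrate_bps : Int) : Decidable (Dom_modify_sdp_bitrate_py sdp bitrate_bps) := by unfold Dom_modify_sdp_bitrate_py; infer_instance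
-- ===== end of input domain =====

-- B replaces A's flat loop threading an in_video flag (and its result[-1] patching) by a
-- prologue + media-block partition of the lines; same O(n) cost, different decomposition.

-- ===== PORT A =====
-- one iteration of A's for-loop: state = (result, in_video_section)
def pvStepA (kbps bps : Int) (st : List String × Bool) (line : String) : List String × Bool :=
  let result := st.1 ++ [line]
  let in_video :=
    if PySem.Str.startswith line "m=video" then true
    else if PySem.Str.startswith line "m=" then false
    else st.2
  let result :=
    if in_video && PySem.Str.startswith line "c=" then
      result ++ ["b=AS:" ++ PySem.Int.toStr kbps, "b=TIAS:" ++ PySem.Int.toStr bps]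
    else result
  let result :=
    if in_video && PySem.Str.startswith line "a=fmtp:" && !(PySem.Str.isIn "x-google-max-bitrate" line) then
      result.dropLast ++ [line ++ ";x-google-max-bitrate=" ++ PySem.Int.toStr kbps
        ++ ";x-google-min-bitrate=" ++ PySem.Int.toStr (PySem.Int.floordiv kbps 2)
        ++ ";x-google-start-bitrate=" ++ PySem.Int.toStr kbps]
    else result
  (result, in_video)

def modify_sdp_bitrate_py (sdp : String) (bitrate_bps : Int) : String :=
  let bitrate_kbps := PySem.Int.floordiv bitrate_bps 1000
  let lines := (PySem.Str.split? sdp "\r\n").getD []   -- sep ≠ "": split? is always some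
  PySem.Str.join "\r\n" ((lines.foldl (pvStepA bitrate_kbps bitrate_bps) ([], false)).1)

-- ===== PORT B =====
-- lines emitted for one line of a video block
def pvVideoLine (kbps bps : Int) (line : String) : List String :=
  if PySem.Str.startswith line "c=" then
    [line, "b=AS:" ++ PySem.Int.toStr kbps, "b=TIAS:" ++ PySem.Int.toStr bps]
  else if PySem.Str.startswith line "a=fmtp:" && !(PySem.Str.isIn "x-google-max-bitrate" line) then
    [line ++ ";x-google-max-bitrate=" ++ PySem.Int.toStr kbps
      ++ ";x-google-min-bitrate=" ++ PySem.Int.toStr (PySem.Int.floordiv kbps 2)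
      ++ ";x-google-start-bitrate=" ++ PySem.Int.toStr kbps]
  else [line]

def pvIsM (line : String) : Bool := PySem.Str.startswith line "m="


-- split into media blocks: each block starts at an m= line and runs to the next one
def pvBlocks (ls : List String) : List (List String) :=
  match ls with
  | [] => []
  | l :: rest =>
      (l :: rest.takeWhile (fun x => !pvIsM x)) ::
        pvBlocks (rest.dropWhile (fun x => !pvIsM x))
termination_by ls.length
decreasing_by
  have h := List.length_dropWhile_le (p := fun x => !pvIsM x) (l := rest)
  simp only [List.length_cons]
  omega

def pvProcBlock (kbps bps : Int) (b : List String) : List String :=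
  match b with
  | [] => []
  | h :: _ => if PySem.Str.startswith h "m=video" then b.flatMap (pvVideoLine kbps bps) else b

def modify_sdp_bitrate_py_alt (sdp : String) (bitrate_bps : Int) : String :=
  let kbps := PySem.Int.floordiv bitrate_bps 1000
  let lines := (PySem.Str.split? sdp "\r\n").getD []
  let prologue := lines.takeWhile (fun x => !pvIsM x)
  let rest := lines.dropWhile (fun x => !pvIsM x)
  PySem.Str.join "\r\n" (prologue ++ (pvBlocks rest).flatMap (pvProcBlock kbps bitrate_bps))

-- ===== PRECONDITION & SPEC =====
def Spec_modify_sdp_bitrate_py (sdp : String) (bitrate_bps : Int) (out : String) : Prop := out = modify_sdp_bitrate_py_alt sdp bitrate_bps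
instance (sdp : String) (bitrate_bps : Int) (out : String) : Decidable (Spec_modify_sdp_bitrate_py sdp bitrate_bps out) := by unfold Spec_modify_sdp_bitrate_py; infer_instance

-- ===== CLAIM (what is proved, stated in full; the proofs are below) =====
def Claim_equal_modify_sdp_bitrate_py : Prop := ∀ (sdp : String) (bitrate_bps : Int), Dom_modify_sdp_bitrate_py sdp bitrate_bps → Spec_modify_sdp_bitrate_py sdp bitrate_bps (modify_sdp_bitrate_py sdp bitrate_bps)

-- ===== LEMMAS AND PROOFS =====

-- the flag A's loop carries after processing `line`
def pvUpd (v : Bool) (line : String) : Bool :=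
  if PySem.Str.startswith line "m=video" then true
  else if PySem.Str.startswith line "m=" then false
  else v

-- what A emits for one line, given the updated flag
def pvEmit (kbps bps : Int) (v : Bool) (line : String) : List String :=
  if v then pvVideoLine kbps bps line else [line]

-- A's loop in recursive form
def pvLoopA (kbps bps : Int) (v : Bool) : List String → List String
  | [] => []
  | l :: ls => pvEmit kbps bps (pvUpd v l) l ++ pvLoopA kbps bps (pvUpd v l) ls

lemma pv_prefix_head {a b : Char} {p q l : List Char}
    (h1 : (a :: p) <+: l) (h2 : (b :: q) <+: l) : a = b := by
  cases l with
  | nil => exact absurd h1 (by simp)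
  | cons x xs =>
    rw [List.cons_prefix_cons] at h1 h2
    exact h1.1.trans h2.1.symm

lemma pv_c_not_fmtp {l : List Char} (h : PySem.Chars.startswith l ['c','='] = true) :
    PySem.Chars.startswith l ['a','=','f','m','t','p',':'] = false := by
  by_contra hf
  rw [Bool.not_eq_false, PySem.Chars.startswith_iff] at hf
  rw [PySem.Chars.startswith_iff] at h
  exact absurd (pv_prefix_head h hf) (by decide)

lemma pv_m_not_c {l : List Char} (h : PySem.Chars.startswith l ['m','='] = true) :
    PySem.Chars.startswith l ['c','='] = false := by
  by_contra hf
  rw [Bool.not_eq_false, PySem.Chars.startswith_iff] at hf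
  rw [PySem.Chars.startswith_iff] at h
  exact absurd (pv_prefix_head h hf) (by decide)

lemma pv_m_not_fmtp {l : List Char} (h : PySem.Chars.startswith l ['m','='] = true) :
    PySem.Chars.startswith l ['a','=','f','m','t','p',':'] = false := by
  by_contra hf
  rw [Bool.not_eq_false, PySem.Chars.startswith_iff] at hf
  rw [PySem.Chars.startswith_iff] at h
  exact absurd (pv_prefix_head h hf) (by decide)

lemma pv_mvideo_isM {l : List Char} (h : PySem.Chars.startswith l ['m','=','v','i','d','e','o'] = true) :
    PySem.Chars.startswith l ['m','='] = true := by
  rw [PySem.Chars.startswith_iff] at h ⊢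
  exact List.IsPrefix.trans (by decide) h

lemma pv_stepA_eq (kbps bps : Int) (acc : List String) (v : Bool) (l : String) :
    pvStepA kbps bps (acc, v) l = (acc ++ pvEmit kbps bps (pvUpd v l) l, pvUpd v l) := by
  simp only [pvStepA, pvEmit, pvVideoLine, pvUpd]
  cases hv : (if PySem.Str.startswith l "m=video" = true then true
      else if PySem.Str.startswith l "m=" = true then false else v) with
  | false => simp
  | true =>
    by_cases hc : PySem.Chars.startswith l.toList ['c','='] = true
    · have hf := pv_c_not_fmtp hc
      simp [hc, hf]
    · by_cases hf : (PySem.Chars.startswith l.toList ['a','=','f','m','t','p',':'] = true ∧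
          PySem.Chars.isIn ['x','-','g','o','o','g','l','e','-','m','a','x','-','b','i','t','r','a','t','e'] l.toList = false)
      · simp [hc, hf]
      · simp [hc, hf]

lemma pv_foldA_eq_loopA (kbps bps : Int) (ls : List String) (acc : List String) (v : Bool) :
    (ls.foldl (pvStepA kbps bps) (acc, v)).1 = acc ++ pvLoopA kbps bps v ls := by
  induction ls generalizing acc v with
  | nil => simp [pvLoopA]
  | cons l ls ih =>
    simp only [List.foldl_cons, pv_stepA_eq, pvLoopA, ih, List.append_assoc]

lemma pv_emit_false (kbps bps : Int) : pvEmit kbps bps false = fun l => [l] := by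
  funext l; simp [pvEmit]

lemma pv_emit_true (kbps bps : Int) : pvEmit kbps bps true = pvVideoLine kbps bps := by
  funext l; simp [pvEmit]

lemma pv_loopA_blocks (kbps bps : Int) :
    ∀ n (ls : List String), ls.length ≤ n → ∀ v,
      pvLoopA kbps bps v ls =
        (ls.takeWhile (fun x => !pvIsM x)).flatMap (pvEmit kbps bps v) ++
          (pvBlocks (ls.dropWhile (fun x => !pvIsM x))).flatMap (pvProcBlock kbps bps) := by
  intro n
  induction n with
  | zero =>
    intro ls h v
    have : ls = [] := List.length_eq_zero_iff.1 (Nat.le_zero.1 h)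
    subst this; simp [pvLoopA, pvBlocks]
  | succ n ih =>
    intro ls h v
    cases ls with
    | nil => simp [pvLoopA, pvBlocks]
    | cons l rest =>
      rw [show pvLoopA kbps bps v (l :: rest)
            = pvEmit kbps bps (pvUpd v l) l ++ pvLoopA kbps bps (pvUpd v l) rest from rfl]
      by_cases hm : PySem.Chars.startswith l.toList ['m','='] = true
      · -- l starts a new block
        have hmS : pvIsM l = true := by simpa [pvIsM] using hm
        rw [show (l :: rest).takeWhile (fun x => !pvIsM x) = [] by simp [hmS],
            show (l :: rest).dropWhile (fun x => !pvIsM x) = l :: rest by simp [hmS]]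
        rw [pvBlocks]
        simp only [List.flatMap_cons, List.flatMap_nil, List.nil_append]
        rw [ih rest (by simpa using Nat.le_of_succ_le_succ h) (pvUpd v l)]
        by_cases hv : PySem.Chars.startswith l.toList ['m','=','v','i','d','e','o'] = true
        · -- video block
          have hupd : pvUpd v l = true := by simp [pvUpd, hv]
          have hl : pvVideoLine kbps bps l = [l] := by
            simp [pvVideoLine, pv_m_not_c hm, pv_m_not_fmtp hm]
          rw [hupd, pv_emit_true]
          simp [pvProcBlock, hv, hl]
        · -- non-video block
          have hvF : PySem.Chars.startswith l.toList ['m','=','v','i','d','e','o'] = false := by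
            simpa using hv
          have hupd : pvUpd v l = false := by simp [pvUpd, hvF, hm]
          rw [hupd, pv_emit_false]
          simp [pvProcBlock, hvF, List.flatMap_singleton']
      · -- l inside the current run: flag unchanged
        have hmC : PySem.Chars.startswith l.toList ['m','='] = false := by simpa using hm
        have hmS : pvIsM l = false := by simpa [pvIsM] using hmC
        have hvF : PySem.Chars.startswith l.toList ['m','=','v','i','d','e','o'] = false := by
          by_contra hc
          exact hm (pv_mvideo_isM (by simpa using hc))
        have hupd : pvUpd v l = v := by simp [pvUpd, hvF, hmC]
        rw [hupd,
            show (l :: rest).takeWhile (fun x => !pvIsM x)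
              = l :: rest.takeWhile (fun x => !pvIsM x) by simp [hmS],
            show (l :: rest).dropWhile (fun x => !pvIsM x)
              = rest.dropWhile (fun x => !pvIsM x) by simp [hmS],
            ih rest (by simpa using Nat.le_of_succ_le_succ h) v]
        simp [List.append_assoc]

-- ===== VERDICT (by name: the statement is the Claim_ definition above) =====
theorem modify_sdp_bitrate_py_spec : Claim_equal_modify_sdp_bitrate_py := by
  intro sdp bps _
  show PySem.Str.join "\r\n"
        (((((PySem.Str.split? sdp "\r\n").getD []).foldl
            (pvStepA (PySem.Int.floordiv bps 1000) bps) ([], false)).1))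
      = PySem.Str.join "\r\n"
        ((((PySem.Str.split? sdp "\r\n").getD []).takeWhile (fun x => !pvIsM x)) ++
          (pvBlocks (((PySem.Str.split? sdp "\r\n").getD []).dropWhile (fun x => !pvIsM x))).flatMap
            (pvProcBlock (PySem.Int.floordiv bps 1000) bps))
  rw [pv_foldA_eq_loopA, pv_loopA_blocks (PySem.Int.floordiv bps 1000) bps
        ((PySem.Str.split? sdp "\r\n").getD []).length _ le_rfl false,
      pv_emit_false, List.flatMap_singleton', List.nil_append]
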